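-- pv_equiv track=rewrite | github.com/wu0306109/gisp | gisp/gisp.py | transform
-- ===== SOURCE A (Python) =====
-- from collections import Counter, defaultdict
-- from typing import Callable, List, NamedTuple, Tuple
--
-- Sequence = List[Tuple[int, List[str]]]
--
-- def transform(sequences: Sequence) -> List[Tuple[int, List[str]]]:
--     result_sequences = []
--     for sequence in sequences:
--         # XXX: use dictionary to merge items,
--         # when allowing time (interval) in float type may cause problem
--         items_mapper = defaultdict(list)  # {time -> items}
--         for time, items in sequence:
--             items_mapper[time].extend(items)
--
--         result_sequence = []
--         for time, items in sorted(items_mapper.items(), key=lambda x: x[0]):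
--             result_sequence.append((time, sorted(items)))
--
--         result_sequences.append(result_sequence)
--
--     return result_sequences
-- ===== SOURCE B (Python) =====
-- def _merge(sequence):
--     s = sorted(sequence, key=lambda p: p[0])
--     out = []
--     i = 0
--     n = len(s)
--     while i < n:
--         time = s[i][0]
--         items = []
--         while i < n and s[i][0] == time:
--             items.extend(s[i][1])
--             i += 1
--         out.append((time, sorted(items)))
--     return out
--
--
-- def transform(sequences):
--     return [_merge(sequence) for sequence in sequences]
-- ===== Notes on version B (the rewrite author's own statement) =====
-- stated objective: alternative
-- what changed: Replaced the defaultdict hash-grouping plus key-sort with a single sort of each inner sequence by time followed by one linear pass merging consecutive equal-time runs.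
import Mathlib
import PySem

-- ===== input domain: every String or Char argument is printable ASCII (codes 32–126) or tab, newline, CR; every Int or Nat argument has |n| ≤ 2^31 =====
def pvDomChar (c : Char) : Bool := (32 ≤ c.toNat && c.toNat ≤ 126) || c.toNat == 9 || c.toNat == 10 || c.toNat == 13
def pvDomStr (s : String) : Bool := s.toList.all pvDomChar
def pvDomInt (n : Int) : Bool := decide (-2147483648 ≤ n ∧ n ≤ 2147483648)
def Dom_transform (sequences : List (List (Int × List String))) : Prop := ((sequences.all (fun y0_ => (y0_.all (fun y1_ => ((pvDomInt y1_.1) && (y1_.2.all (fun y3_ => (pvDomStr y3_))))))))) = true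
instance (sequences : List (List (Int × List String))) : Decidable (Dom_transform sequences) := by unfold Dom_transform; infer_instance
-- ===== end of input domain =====

-- B replaces A's defaultdict grouping + key sort by sort-then-merge-consecutive-runs; same return value, proved equal.

-- ===== PORT A =====
-- 'items_mapper[time].extend(items)' on a defaultdict(list) is d.modify time [] (· ++ items)
def transform (sequences : List (List (Int × List String))) : List (List (Int × List String)) :=
  sequences.foldl (fun resultSequences sequence =>
    let itemsMapper : PySem.Dict Int (List String) :=
      sequence.foldl (fun d p => d.modify p.1 [] (fun v => v ++ p.2)) PySem.Dict.empty
    let resultSequence :=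
      (PySem.List.sorted itemsMapper.items (fun x => x.1) false).foldl
        (fun acc p => acc ++ [(p.1, PySem.List.sorted p.2 (fun x => x) false)]) []
    resultSequences ++ [resultSequence]) []

-- ===== PORT B =====
-- the inner while-loop of Source B: consume the run of pairs sharing the current time, then recurse on the rest
def mergeRun : List (Int × List String) → List (Int × List String)
  | [] => []
  | (t, items) :: rest =>
    (t, PySem.List.sorted (items ++ (rest.takeWhile (fun q => q.1 == t)).flatMap (fun q => q.2)) (fun x => x) false)
      :: mergeRun (rest.dropWhile (fun q => q.1 == t))
termination_by l => l.length
decreasing_by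
  simp only [List.length_cons]
  exact Nat.lt_succ_of_le (List.dropWhile_sublist _ |>.length_le)

def transform_alt (sequences : List (List (Int × List String))) : List (List (Int × List String)) :=
  sequences.map (fun sequence => mergeRun (PySem.List.sorted sequence (fun p => p.1) false))

-- ===== PRECONDITION & SPEC =====
def Spec_transform (sequences : List (List (Int × List String))) (out : List (List (Int × List String))) : Prop := out = transform_alt sequences
instance (sequences : List (List (Int × List String))) (out : List (List (Int × List String))) : Decidable (Spec_transform sequences out) := by unfold Spec_transform; infer_instance

-- ===== CLAIM (what is proved, stated in full; the proofs are below) =====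
def Claim_equal_transform : Prop := ∀ (sequences : List (List (Int × List String))), Dom_transform sequences → Spec_transform sequences (transform sequences)

-- ===== LEMMAS AND PROOFS =====

-- all items merged for time t, in original order
def collect (s : List (Int × List String)) (t : Int) : List String :=
  ((s.filter (fun p => p.1 == t)).map (fun p => p.2)).flatten

-- the canonical result both sides are shown to compute for one inner sequence
def canon (s : List (Int × List String)) : List (Int × List String) :=
  (PySem.List.sorted (PySem.Set.ofList (s.map (fun p => p.1))) (fun x => x) false).map
    (fun t => (t, PySem.List.sorted (collect s t) (fun x => x) false))

theorem collect_cons (p : Int × List String) (l : List (Int × List String)) (c : Int) :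
    collect (p :: l) c = if p.1 = c then p.2 ++ collect l c else collect l c := by
  simp [collect, List.filter_cons]
  split_ifs with h <;> simp

theorem getD_foldl_modify_extend (l : List (Int × List String))
    (d : PySem.Dict Int (List String)) (c : Int) :
    (l.foldl (fun d p => d.modify p.1 [] (fun v => v ++ p.2)) d).getD c [] =
      d.getD c [] ++ collect l c := by
  induction l generalizing d with
  | nil => simp [collect]
  | cons p l ih =>
    simp only [List.foldl_cons, ih, collect_cons]
    rw [PySem.Dict.getD_modify]
    rcases eq_or_ne c p.1 with h | h
    · subst h; simp
    · simp [h, Ne.symm h]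

theorem aInner_eq_canon (s : List (Int × List String)) :
    (PySem.List.sorted
        (s.foldl (fun d p => d.modify p.1 [] (fun v => v ++ p.2)) PySem.Dict.empty).items
        (fun x => x.1) false).foldl
      (fun acc p => acc ++ [(p.1, PySem.List.sorted p.2 (fun x => x) false)]) [] = canon s := by
  set d := s.foldl (fun d p => d.modify p.1 [] (fun v => v ++ p.2)) PySem.Dict.empty with hd
  have hnd : d.keys.Nodup := by
    rw [hd]
    exact PySem.Dict.nodup_keys_foldl_modify_key s (fun p => p.1) [] (fun d p v => v ++ p.2)
      PySem.Dict.empty PySem.Dict.nodup_keys_empty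
  have hkeys : d.keys = PySem.Set.ofList (s.map (fun p => p.1)) := by
    rw [hd, PySem.Dict.keys_foldl_modify_key]
    simp [PySem.Dict.keys_empty, PySem.Set.update_nil_left]
  have hitems : d.items = (PySem.Set.ofList (s.map (fun p => p.1))).map (fun k => (k, collect s k)) := by
    rw [PySem.Dict.items_eq_map_keys d hnd []]
    rw [hkeys]
    refine List.map_congr_left (fun k _ => ?_)
    have := getD_foldl_modify_extend s PySem.Dict.empty k
    rw [← hd] at this
    simp [this, PySem.Dict.getD_empty]
  have hsorted : PySem.List.sorted d.items (fun x => x.1) false =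
      (PySem.List.sorted (PySem.Set.ofList (s.map (fun p => p.1))) (fun x => x) false).map
        (fun k => (k, collect s k)) := by
    apply PySem.List.sorted_eq_of_perm_of_pairwise_lt
    · rw [hitems]
      exact ((PySem.List.sorted_perm _ _ _)).map _
    · have hlt := PySem.List.sorted_ofList_pairwise_lt (xs := s.map (fun p => p.1))
      exact hlt.map _ (fun a b h => h)
  rw [PySem.List.foldl_append_singleton_eq_map, hsorted, List.map_map, canon]
  simp

-- membership in a dropWhile-suffix of a key-le-sorted list means key strictly above the head key
theorem dropWhile_key_gt (t : Int) (rest : List (Int × List String))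
    (hp : rest.Pairwise (fun a b => a.1 ≤ b.1))
    (hge : ∀ q ∈ rest, t ≤ q.1) :
    ∀ q ∈ rest.dropWhile (fun q => q.1 == t), t < q.1 := by
  induction rest with
  | nil => simp
  | cons b tl ih =>
    rw [List.dropWhile_cons]
    split_ifs with hb
    · exact ih (hp.sublist (List.sublist_cons_self _ _))
        (fun q hq => hge q (List.mem_cons_of_mem _ hq))
    · intro q hq
      simp only [beq_iff_eq] at hb
      have hbt : t < b.1 := lt_of_le_of_ne (hge b (List.mem_cons_self)) (Ne.symm hb)
      rcases List.mem_cons.mp hq with rfl | hq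
      · exact hbt
      · exact lt_of_lt_of_le hbt ((List.pairwise_cons.mp hp).1 q hq)

theorem update_cons_not_mem (t : Int) (ys : List Int) (s : List Int) (h : t ∉ ys) :
    PySem.Set.update (t :: s) ys = t :: PySem.Set.update s ys := by
  induction ys generalizing s with
  | nil => simp [PySem.Set.update]
  | cons y ys ih =>
    have hyt : y ≠ t := fun hh => h (hh ▸ List.mem_cons_self)
    rw [PySem.Set.update_cons, PySem.Set.update_cons]
    have hadd : PySem.Set.add (t :: s) y = t :: PySem.Set.add s y := by
      rw [PySem.Set.add_eq_ite, PySem.Set.add_eq_ite]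
      simp only [List.mem_cons]
      split_ifs with h1 h2 h2 <;> first
        | rfl
        | (exfalso; rcases h1 with h1 | h1; exact hyt h1; exact h2 h1)
        | (exfalso; exact h1 (Or.inr h2))
    rw [hadd, ih _ (fun hy => h (List.mem_cons_of_mem _ hy))]

theorem update_all_eq (t : Int) (xs : List Int) (h : ∀ x ∈ xs, x = t) :
    PySem.Set.update [t] xs = [t] := by
  induction xs with
  | nil => simp [PySem.Set.update]
  | cons x xs ih =>
    rw [PySem.Set.update_cons, PySem.Set.add_of_mem (by simp [h x List.mem_cons_self])]
    exact ih (fun x hx => h x (List.mem_cons_of_mem _ hx))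

theorem ofList_run (t : Int) (xs ys : List Int) (hx : ∀ x ∈ xs, x = t) (hy : t ∉ ys) :
    PySem.Set.ofList (t :: (xs ++ ys)) = t :: PySem.Set.ofList ys := by
  rw [← PySem.Set.update_nil_left, PySem.Set.update_cons, PySem.Set.update_append]
  have : PySem.Set.add ([] : List Int) t = [t] := by
    rw [PySem.Set.add_of_not_mem (by simp)]; rfl
  rw [this, update_all_eq t xs hx, update_cons_not_mem t ys [] hy]
  rw [PySem.Set.update_nil_left]

-- merging consecutive runs of a key-le-sorted list computes canon's entries over the distinct keys
theorem mergeRun_eq (l : List (Int × List String)) (hp : l.Pairwise (fun a b => a.1 ≤ b.1)) :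
    mergeRun l = (PySem.Set.ofList (l.map (fun p => p.1))).map
      (fun t => (t, PySem.List.sorted (collect l t) (fun x => x) false)) := by
  induction l using mergeRun.induct with
  | case1 => simp [mergeRun, collect]
  | case2 t items rest ih =>
    set run := rest.takeWhile (fun q => q.1 == t) with hrun
    set rest' := rest.dropWhile (fun q => q.1 == t) with hrest'
    have hsplit : rest = run ++ rest' := (List.takeWhile_append_dropWhile).symm
    have hcons := List.pairwise_cons.mp hp
    have hrestp : rest.Pairwise (fun a b => a.1 ≤ b.1) := hcons.2
    have hge : ∀ q ∈ rest, t ≤ q.1 := hcons.1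
    have hrunt : ∀ q ∈ run, q.1 = t := by
      intro q hq
      have := List.mem_takeWhile_imp hq
      simpa using this
    have hrest'p : rest'.Pairwise (fun a b => a.1 ≤ b.1) :=
      hrestp.sublist (List.dropWhile_sublist _)
    have hgt : ∀ q ∈ rest', t < q.1 := dropWhile_key_gt t rest hrestp hge
    have hkeys : PySem.Set.ofList (((t, items) :: rest).map (fun p => p.1)) =
        t :: PySem.Set.ofList (rest'.map (fun p => p.1)) := by
      rw [List.map_cons]
      conv_lhs => rw [hsplit]
      rw [List.map_append]
      exact ofList_run t _ _ (by intro x hx; rcases List.mem_map.mp hx with ⟨q, hq, rfl⟩; exact hrunt q hq)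
        (by intro hmem; rcases List.mem_map.mp hmem with ⟨q, hq, hq1⟩; exact absurd hq1 (ne_of_gt (hgt q hq)))
    have hcoll_t : collect ((t, items) :: rest) t = items ++ run.flatMap (fun q => q.2) := by
      rw [collect_cons]
      simp only [reduceIte]
      conv_lhs => rw [hsplit]
      unfold collect
      rw [List.filter_append]
      have h1 : run.filter (fun p => p.1 == t) = run :=
        List.filter_eq_self.mpr (fun q hq => by simp [hrunt q hq])
      have h2 : rest'.filter (fun p => p.1 == t) = [] :=
        List.filter_eq_nil_iff.mpr (fun q hq => by simp [(ne_of_lt (hgt q hq)).symm])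
      rw [h1, h2, List.append_nil, List.flatMap_def]
    have hcoll_u : ∀ u ∈ PySem.Set.ofList (rest'.map (fun p => p.1)),
        collect ((t, items) :: rest) u = collect rest' u := by
      intro u hu
      have hut : t < u := by
        rcases List.mem_map.mp ((PySem.Set.mem_ofList _ _).mp hu) with ⟨q, hq, rfl⟩
        exact hgt q hq
      rw [collect_cons]
      rw [if_neg (by exact ne_of_lt hut)]
      conv_lhs => rw [hsplit]
      unfold collect
      rw [List.filter_append]
      have h1 : run.filter (fun p => p.1 == u) = [] :=
        List.filter_eq_nil_iff.mpr (fun q hq => by simp [hrunt q hq, ne_of_lt hut])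
      rw [h1, List.nil_append]
    rw [mergeRun, hkeys, List.map_cons, ih hrest'p, hcoll_t]
    congr 1
    exact (List.map_congr_left (fun u hu => by rw [hcoll_u u hu])).symm

-- Set.ofList of a ≤-pairwise list is ≤-pairwise
theorem ofList_pairwise_le (xs : List Int) (h : xs.Pairwise (· ≤ ·)) :
    (PySem.Set.ofList xs).Pairwise (· ≤ ·) := by
  induction xs with
  | nil => simp [PySem.Set.ofList]
  | cons x xs ih =>
    rw [PySem.Set.ofList_cons]
    have hcons := List.pairwise_cons.mp h
    refine List.pairwise_cons.mpr ⟨?_, ?_⟩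
    · intro y hy
      have := (PySem.Set.mem_ofList _ _).mp ((PySem.Set.mem_discard _ _ _).mp hy).1
      exact hcons.1 y this
    · have hIH := ih hcons.2
      exact hIH.sublist (by simp [PySem.Set.discard])
  
theorem bInner_eq_canon (s : List (Int × List String)) :
    mergeRun (PySem.List.sorted s (fun p => p.1) false) = canon s := by
  set ss := PySem.List.sorted s (fun p => p.1) false with hss
  have hperm : ss.Perm s := PySem.List.sorted_perm _ _ _
  have hpw : ss.Pairwise (fun a b => a.1 ≤ b.1) := PySem.List.sorted_pairwise _ _
  rw [mergeRun_eq ss hpw, canon]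
  have hKnodup : (PySem.Set.ofList (ss.map (fun p => p.1))).Nodup := PySem.Set.nodup_ofList _
  have hKlt : (PySem.Set.ofList (ss.map (fun p => p.1))).Pairwise (· < ·) := by
    have hle : (PySem.Set.ofList (ss.map (fun p => p.1))).Pairwise (· ≤ ·) :=
      ofList_pairwise_le _ (hpw.map _ (fun {a b} h => h))
    have := hle.and hKnodup
    exact this.imp (fun {a b} hab => lt_of_le_of_ne hab.1 hab.2)
  have hKperm : (PySem.Set.ofList (ss.map (fun p => p.1))).Perm
      (PySem.Set.ofList (s.map (fun p => p.1))) := by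
    apply (List.perm_ext_iff_of_nodup hKnodup (PySem.Set.nodup_ofList _)).mpr
    intro a
    simp only [PySem.Set.mem_ofList]
    constructor
    · intro ha; rcases List.mem_map.mp ha with ⟨q, hq, rfl⟩
      exact List.mem_map_of_mem (hperm.mem_iff.mp hq)
    · intro ha; rcases List.mem_map.mp ha with ⟨q, hq, rfl⟩
      exact List.mem_map_of_mem (hperm.mem_iff.mpr hq)
  have hkeys : PySem.List.sorted (PySem.Set.ofList (s.map (fun p => p.1))) (fun x => x) false =
      PySem.Set.ofList (ss.map (fun p => p.1)) :=
    PySem.List.sorted_eq_of_perm_of_pairwise_lt _ _ _ hKperm hKlt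
  rw [hkeys]
  refine List.map_congr_left (fun u _ => ?_)
  have hcperm : (collect ss u).Perm (collect s u) := by
    unfold collect
    exact ((hperm.filter _).map _).flatten
  congr 1
  exact PySem.List.sorted_eq_sorted_of_perm _ _ _ (fun a b h => h) hcperm

-- ===== VERDICT (by name: the statement is the Claim_ definition above) =====
theorem transform_spec : Claim_equal_transform := by
  intro sequences _
  unfold Spec_transform transform transform_alt
  rw [PySem.List.foldl_append_singleton_eq_map]
  simp only [List.nil_append]
  refine List.map_congr_left (fun s _ => ?_)
  rw [aInner_eq_canon, bInner_eq_canon]
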